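-- pv_equiv track=rewrite | github.com/lissrbay/bug_ml | new/model/catboost_tagger.py | split_by_report_id
-- ===== SOURCE A (Python) =====
-- def split_by_report_id(grouping, train_count):
--     last_group = -1
--     border = (0, 0)
--     for i, report_id in enumerate(grouping):
--         if report_id != last_group:
--             last_group = report_id
--             border = (border[0] + 1, border[1])
--
--         if border[0] == train_count:
--             break
--         border = (border[0], border[1] + 1)
--
--     return border[1]
-- ===== SOURCE B (Python) =====
-- def split_by_report_id(grouping, train_count):
--     starts = []
--     prev = -1
--     for i, g in enumerate(grouping):
--         if g != prev:
--             starts.append(i)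
--             prev = g
--     if 1 <= train_count <= len(starts):
--         return starts[train_count - 1]
--     return len(grouping)
-- ===== Notes on version B (the rewrite author's own statement) =====
-- stated objective: simpler
-- what changed: B builds the list of group-start indices in one pass and answers with a single indexed lookup (or len(grouping) when train_count is out of range), replacing A's counting loop with tuple state and an early break.
-- intended difference: When train_count = 0 and the list starts with the sentinel -1, A breaks at the first row and returns 0 although the leading -1 run was never counted as a group; B returns len(grouping), consistent with A's own result for train_count = 0 on lists not starting with -1. — e.g. on split_by_report_id([-1, 3], 0): A returns 0, B returns 2
import Mathlib
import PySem

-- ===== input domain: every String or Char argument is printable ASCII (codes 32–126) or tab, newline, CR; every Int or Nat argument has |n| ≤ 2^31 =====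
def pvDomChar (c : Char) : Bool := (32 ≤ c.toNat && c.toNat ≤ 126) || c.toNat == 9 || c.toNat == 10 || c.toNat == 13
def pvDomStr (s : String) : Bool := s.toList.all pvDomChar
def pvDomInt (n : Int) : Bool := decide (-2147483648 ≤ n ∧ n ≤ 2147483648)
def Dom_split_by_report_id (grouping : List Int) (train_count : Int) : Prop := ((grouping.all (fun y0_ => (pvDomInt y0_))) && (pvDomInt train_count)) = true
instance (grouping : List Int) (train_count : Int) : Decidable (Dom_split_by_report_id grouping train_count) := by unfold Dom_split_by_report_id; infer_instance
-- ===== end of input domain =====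

-- B builds the list of group-start indices in one pass and answers by a single indexed
-- lookup, instead of A's counting loop with an early break (objective: simpler; not faster).


-- ===== PORT A =====
-- the for-loop with early break, state = (last_group, border0, border1)
def splitLoopA : List Int → Int → Int → Int → Int → Int
  | [], _, _, b1, _ => b1
  | r :: rest, lg, b0, b1, tc =>
    let lg' := if r ≠ lg then r else lg
    let b0' := if r ≠ lg then b0 + 1 else b0
    if b0' = tc then b1
    else splitLoopA rest lg' b0' (b1 + 1) tc

def split_by_report_id (grouping : List Int) (train_count : Int) : Int :=
  splitLoopA grouping (-1) 0 0 train_count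

-- ===== PORT B =====
-- one pass collecting the indices where the group id changes (prev seeded with -1)
def startsB : List Int → Int → Int → List Int
  | [], _, _ => []
  | g :: rest, prev, i =>
    if g ≠ prev then i :: startsB rest g (i + 1)
    else startsB rest prev (i + 1)

def split_by_report_id_alt (grouping : List Int) (train_count : Int) : Int :=
  let s := startsB grouping (-1) 0
  if 1 ≤ train_count ∧ train_count ≤ (s.length : Int) then
    s.getD (train_count - 1).toNat 0
  else (grouping.length : Int)

-- ===== PRECONDITION & SPEC =====
-- When train_count = 0 and the list begins with the sentinel value -1, A breaks at the very
-- first row and returns 0 even though the leading -1 run was never counted as a group; B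
-- treats train_count = 0 as out of range and returns len(grouping), consistent with A's own
-- behaviour for train_count = 0 on every list not starting with -1.
def D_split_by_report_id (grouping : List Int) (train_count : Int) : Prop :=
  train_count = 0 ∧ grouping.head? = some (-1)
instance (grouping : List Int) (train_count : Int) : Decidable (D_split_by_report_id grouping train_count) := by unfold D_split_by_report_id; infer_instance

def Spec_split_by_report_id (grouping : List Int) (train_count : Int) (out : Int) : Prop := ¬ D_split_by_report_id grouping train_count → out = split_by_report_id_alt grouping train_count
instance (grouping : List Int) (train_count : Int) (out : Int) : Decidable (Spec_split_by_report_id grouping train_count out) := by unfold Spec_split_by_report_id; infer_instance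

def pvDiffWitness_split_by_report_id : List Int × Int := ([-1, 3], 0)
def pvDiffWitnessOut_split_by_report_id : Int × Int := (0, 2)

-- ===== CLAIM (what is proved, stated in full; the proofs are below) =====
def Claim_unchanged_split_by_report_id : Prop := ∀ (grouping : List Int) (train_count : Int), Dom_split_by_report_id grouping train_count → Spec_split_by_report_id grouping train_count (split_by_report_id grouping train_count)
def Claim_changed_split_by_report_id : Prop := Dom_split_by_report_id (pvDiffWitness_split_by_report_id.1) (pvDiffWitness_split_by_report_id.2) ∧ D_split_by_report_id (pvDiffWitness_split_by_report_id.1) (pvDiffWitness_split_by_report_id.2) ∧ split_by_report_id (pvDiffWitness_split_by_report_id.1) (pvDiffWitness_split_by_report_id.2) = pvDiffWitnessOut_split_by_report_id.1 ∧ split_by_report_id_alt (pvDiffWitness_split_by_report_id.1) (pvDiffWitness_split_by_report_id.2) = pvDiffWitnessOut_split_by_report_id.2 ∧ pvDiffWitnessOut_split_by_report_id.1 ≠ pvDiffWitnessOut_split_by_report_id.2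
def Claim_exact_split_by_report_id : Prop := ∀ (grouping : List Int) (train_count : Int), Dom_split_by_report_id grouping train_count → D_split_by_report_id grouping train_count → split_by_report_id grouping train_count ≠ split_by_report_id_alt grouping train_count

-- ===== LEMMAS AND PROOFS =====

-- Loop invariant: with b0 ≠ tc groups counted so far and b1 rows consumed, A's loop returns
-- the (tc - b0)-th entry of B's remaining boundary table when it exists, else b1 + |rest|.
theorem splitLoopA_eq (rest : List Int) : ∀ (lg b0 b1 tc : Int), b0 ≠ tc →
    splitLoopA rest lg b0 b1 tc =
      if b0 < tc ∧ tc - b0 ≤ ((startsB rest lg b1).length : Int) then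
        (startsB rest lg b1).getD (tc - b0 - 1).toNat 0
      else b1 + (rest.length : Int) := by
  induction rest with
  | nil =>
    intro lg b0 b1 tc h
    simp only [splitLoopA, startsB, List.length_nil]
    rw [if_neg (by omega)]
    simp
  | cons g rest ih =>
    intro lg b0 b1 tc h
    by_cases hg : g ≠ lg
    · simp only [splitLoopA, startsB, if_pos hg]
      by_cases hb : b0 + 1 = tc
      · rw [if_pos (by omega)]
        rw [if_pos (by simp; omega)]
        have : (tc - b0 - 1).toNat = 0 := by omega
        simp [this]
      · rw [if_neg (by omega)]
        rw [ih g (b0 + 1) (b1 + 1) tc (by omega)]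
        by_cases hc : b0 + 1 < tc ∧ tc - (b0 + 1) ≤ ((startsB rest g (b1 + 1)).length : Int)
        · rw [if_pos hc, if_pos (by simp; omega)]
          have h1 : (tc - b0 - 1).toNat = (tc - (b0 + 1) - 1).toNat + 1 := by omega
          simp [h1]
        · rw [if_neg hc, if_neg (by simp at hc ⊢; omega)]
          simp; ring
    · simp only [splitLoopA, startsB, if_neg hg]
      rw [if_neg (by omega)]
      rw [ih lg b0 (b1 + 1) tc h]
      by_cases hc : b0 < tc ∧ tc - b0 ≤ ((startsB rest lg (b1 + 1)).length : Int)
      · rw [if_pos hc, if_pos hc]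
      · rw [if_neg hc, if_neg hc]
        simp; ring

-- ===== VERDICT (by name: the statement is the Claim_ definition above) =====
theorem split_by_report_id_spec : Claim_unchanged_split_by_report_id := by
  intro grouping train_count _ hD
  unfold split_by_report_id split_by_report_id_alt
  unfold D_split_by_report_id at hD
  by_cases htc : train_count = 0
  · subst htc
    match grouping with
    | [] => simp [splitLoopA, startsB]
    | g :: rest =>
      have hg : g ≠ -1 := by
        intro hgg; exact hD ⟨rfl, by simp [hgg]⟩
      simp only [splitLoopA, startsB, if_pos hg]
      rw [if_neg (by omega)]
      rw [show (0:Int)+1 = 1 from rfl, splitLoopA_eq rest g 1 1 0 (by omega)]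
      rw [if_neg (by omega)]
      rw [if_neg (fun h => absurd h.1 (by omega))]
      simp only [List.length_cons]; push_cast; ring
  · rw [splitLoopA_eq grouping (-1) 0 0 train_count (by omega)]
    simp only [zero_add, Int.sub_zero]
    by_cases hc : 0 < train_count ∧ train_count ≤ ((startsB grouping (-1) 0).length : Int)
    · rw [if_pos hc, if_pos (by omega)]
    · rw [if_neg hc, if_neg (by omega)]

theorem split_by_report_id_changed : Claim_changed_split_by_report_id := by
  unfold Claim_changed_split_by_report_id; decide

theorem split_by_report_id_tight : Claim_exact_split_by_report_id := by
  intro grouping train_count _ hD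
  obtain ⟨htc, hh⟩ := hD
  subst htc
  match grouping, hh with
  | (-1) :: rest, _ =>
    have hA : split_by_report_id ((-1) :: rest) 0 = 0 := by
      simp [split_by_report_id, splitLoopA]
    have hB : split_by_report_id_alt ((-1) :: rest) 0 = (rest.length : Int) + 1 := by
      unfold split_by_report_id_alt
      rw [if_neg (fun h => absurd h.1 (by omega))]
      simp only [List.length_cons]; push_cast; ring
    rw [hA, hB]
    omega
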